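-- pv_equiv track=rewrite | github.com/ash2298744/Leetcode-Solutions | 01. Easy/1518. Water Bottles/1518.py | numWaterBottles
-- ===== SOURCE A (Python) =====
-- def numWaterBottles(numBottles: int, numExchange: int) -> int:
--     res = empty = 0
--     while numBottles:
--         numBottles -= 1
--         empty += 1
--         res += 1
--         if empty == numExchange:
--             numBottles += 1
--             empty = 0
--     return res
-- ===== SOURCE B (Python) =====
-- def numWaterBottles(numBottles: int, numExchange: int) -> int:
--     # No net-gaining exchange possible: you only drink the bottles you have.
--     if numBottles <= 0 or numExchange <= 1:
--         return numBottles
--     return numBottles + (numBottles - 1) // (numExchange - 1)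
-- ===== Notes on version B (the rewrite author's own statement) =====
-- stated objective: faster
-- what changed: Replaces the bottle-by-bottle simulation loop with the closed form numBottles + (numBottles-1)//(numExchange-1) (and returns numBottles directly when no net-gaining exchange exists).
import Mathlib
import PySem

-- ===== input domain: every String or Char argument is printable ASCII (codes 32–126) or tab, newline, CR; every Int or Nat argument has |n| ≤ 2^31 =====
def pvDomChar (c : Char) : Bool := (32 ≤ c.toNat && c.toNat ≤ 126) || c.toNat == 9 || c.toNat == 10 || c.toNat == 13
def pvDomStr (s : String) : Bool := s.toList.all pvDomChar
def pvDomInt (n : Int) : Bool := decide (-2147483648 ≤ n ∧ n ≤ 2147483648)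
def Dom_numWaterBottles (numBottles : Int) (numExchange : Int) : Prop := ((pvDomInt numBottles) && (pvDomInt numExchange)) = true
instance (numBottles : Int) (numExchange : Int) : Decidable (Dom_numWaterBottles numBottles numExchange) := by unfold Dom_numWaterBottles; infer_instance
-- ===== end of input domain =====

-- B replaces A's bottle-by-bottle simulation loop with the closed form
-- numBottles + (numBottles-1)//(numExchange-1)  (O(1) instead of O(numBottles)).

-- ===== PORT A =====
-- A's while-loop, step for step; fuel only makes the recursion total (Python A
-- diverges outside Pre_; inside Pre_ the fuel is provably sufficient).
def pvLoopA (ne : Int) : Nat → Int → Int → Int → Int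
  | 0, _, _, res => res
  | fuel+1, nb, empty, res =>
    if nb ≠ 0 then
      let nb' := nb - 1
      let empty' := empty + 1
      let res' := res + 1
      if empty' = ne then pvLoopA ne fuel (nb' + 1) 0 res'
      else pvLoopA ne fuel nb' empty' res'
    else res

def numWaterBottles (numBottles : Int) (numExchange : Int) : Int :=
  pvLoopA numExchange ((2 * numBottles).toNat + 1) numBottles 0 0

-- ===== PORT B =====
def numWaterBottles_alt (numBottles : Int) (numExchange : Int) : Int :=
  if numBottles ≤ 0 ∨ numExchange ≤ 1 then numBottles
  else numBottles + PySem.Int.floordiv (numBottles - 1) (numExchange - 1)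

-- ===== PRECONDITION & SPEC =====
-- Pre_ excludes exactly the inputs on which A's while-loop never terminates:
-- numBottles < 0, or numExchange = 1 with numBottles > 0 (each exchange refills
-- the bottle it consumed). Everywhere A returns, it is inside Pre_.
def Pre_numWaterBottles (numBottles : Int) (numExchange : Int) : Prop :=
  0 ≤ numBottles ∧ (2 ≤ numExchange ∨ numExchange ≤ 0 ∨ numBottles = 0)
instance (numBottles : Int) (numExchange : Int) : Decidable (Pre_numWaterBottles numBottles numExchange) := by unfold Pre_numWaterBottles; infer_instance

def pvWitness_numWaterBottles : Int × Int := (9, 3)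

def Spec_numWaterBottles (numBottles : Int) (numExchange : Int) (out : Int) : Prop := out = numWaterBottles_alt numBottles numExchange
instance (numBottles : Int) (numExchange : Int) (out : Int) : Decidable (Spec_numWaterBottles numBottles numExchange out) := by unfold Spec_numWaterBottles; infer_instance

-- ===== CLAIM (what is proved, stated in full; the proofs are below) =====
def Claim_equal_numWaterBottles : Prop := ∀ (numBottles : Int) (numExchange : Int), Dom_numWaterBottles numBottles numExchange → Pre_numWaterBottles numBottles numExchange → Spec_numWaterBottles numBottles numExchange (numWaterBottles numBottles numExchange)

-- ===== LEMMAS AND PROOFS =====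

-- total drinks obtained from state (nb full, e empty), for exchange rate ne ≥ 2
def pvG (ne nb e : Int) : Int :=
  if nb = 0 then 0 else nb + (nb + e - 1) / (ne - 1)

lemma pvG_nonneg (ne nb e : Int) (hne : 2 ≤ ne) (hnb : 0 ≤ nb) (he : 0 ≤ e) :
    0 ≤ pvG ne nb e := by
  unfold pvG
  split_ifs with h
  · exact le_refl 0
  · have h1 : (0:Int) ≤ (nb + e - 1) / (ne - 1) := by
      apply Int.ediv_nonneg <;> omega
    omega

lemma pvLoopA_eq (ne : Int) (hne : 2 ≤ ne) :
    ∀ (fuel : Nat) (nb e res : Int), 0 ≤ nb → 0 ≤ e → e < ne →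
      pvG ne nb e ≤ (fuel : Int) →
      pvLoopA ne fuel nb e res = res + pvG ne nb e := by
  intro fuel
  induction fuel with
  | zero =>
    intro nb e res hnb he helt hfuel
    have h0 : pvG ne nb e = 0 := le_antisymm (by exact_mod_cast hfuel) (pvG_nonneg ne nb e hne hnb he)
    simp [pvLoopA, h0]
  | succ fuel ih =>
    intro nb e res hnb he helt hfuel
    by_cases hz : nb = 0
    · simp [pvLoopA, hz, pvG]
    · have hnb1 : 1 ≤ nb := by omega
      simp only [pvLoopA, if_pos hz]
      by_cases hE : e + 1 = ne
      · -- exchange fires: state becomes (nb, 0)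
        have hG0 : pvG ne nb 0 = nb + (nb - 1) / (ne - 1) := by
          unfold pvG; rw [if_neg hz]; norm_num
        have hkey : pvG ne nb e = 1 + pvG ne nb 0 := by
          rw [hG0]; unfold pvG; rw [if_neg hz]
          have h1 : nb + e - 1 = (nb - 1) + 1 * (ne - 1) := by omega
          rw [h1, Int.add_mul_ediv_right _ _ (by omega : ne - 1 ≠ 0)]
          omega
        rw [if_pos hE]
        have hrw : nb - 1 + 1 = nb := by omega
        rw [hrw, ih nb 0 (res + 1) hnb le_rfl (by omega) (by omega)]
        omega
      · rw [if_neg hE]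
        have hkey : pvG ne nb e = 1 + pvG ne (nb - 1) (e + 1) := by
          unfold pvG
          rw [if_neg hz]
          by_cases h1 : nb = 1
          · subst h1
            rw [if_pos (by omega)]
            have : (1 + e - 1) / (ne - 1) = 0 :=
              Int.ediv_eq_zero_of_lt (by omega) (by omega)
            omega
          · rw [if_neg (by omega : ¬ nb - 1 = 0)]
            have hrw : nb + e - 1 = (nb - 1) + (e + 1) - 1 := by omega
            rw [hrw]
            omega
        rw [ih (nb - 1) (e + 1) (res + 1) (by omega) (by omega) (by omega) (by omega)]
        omega

-- numExchange ≤ 0: the exchange branch never fires, the loop just drains nb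
lemma pvLoopA_noex (ne : Int) (hne : ne ≤ 0) :
    ∀ (fuel : Nat) (nb e res : Int), 0 ≤ nb → nb ≤ (fuel : Int) → 0 ≤ e →
      pvLoopA ne fuel nb e res = res + nb := by
  intro fuel
  induction fuel with
  | zero =>
    intro nb e res hnb hf he
    simp only [pvLoopA]
    omega
  | succ fuel ih =>
    intro nb e res hnb hf he
    by_cases hz : nb = 0
    · simp [pvLoopA, hz]
    · simp only [pvLoopA, if_pos hz]
      rw [if_neg (by omega : ¬ (e + 1 = ne))]
      rw [ih (nb - 1) (e + 1) (res + 1) (by omega) (by push_cast at hf ⊢; omega) (by omega)]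
      omega

theorem numWaterBottles_spec : Claim_equal_numWaterBottles := by
  intro nb ne _ hpre
  obtain ⟨hnb, hne⟩ := hpre
  unfold Spec_numWaterBottles numWaterBottles numWaterBottles_alt
  by_cases hcase : 2 ≤ ne
  · have hdiv : PySem.Int.floordiv (nb - 1) (ne - 1) = (nb - 1) / (ne - 1) :=
      PySem.Int.floordiv_eq_ediv_of_pos (by omega)
    have hfuel : pvG ne nb 0 ≤ ((2 * nb).toNat + 1 : Nat) := by
      unfold pvG
      split_ifs with h
      · positivity
      · have h1 : (nb + 0 - 1) / (ne - 1) ≤ nb + 0 - 1 :=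
          Int.ediv_le_self _ (by omega)
        have h2 : ((2 * nb).toNat : Int) = 2 * nb := by omega
        push_cast
        omega
    rw [pvLoopA_eq ne hcase _ nb 0 0 hnb le_rfl (by omega) hfuel]
    by_cases h : nb = 0
    · simp [pvG, h]
    · have hG0 : pvG ne nb 0 = nb + (nb - 1) / (ne - 1) := by
        unfold pvG; rw [if_neg h]; norm_num
      rw [hG0, if_neg (by omega : ¬ (nb ≤ 0 ∨ ne ≤ 1)), hdiv]
      omega
  · -- ne ≤ 0, or nb = 0
    by_cases h0 : nb = 0
    · subst h0
      rw [if_pos (by omega)]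
      cases h : ((2 * (0:Int)).toNat + 1) with
      | zero => simp [pvLoopA]
      | succ k => simp [pvLoopA]
    · have hne0 : ne ≤ 0 := by omega
      rw [pvLoopA_noex ne hne0 _ nb 0 0 hnb (by push_cast; omega) le_rfl]
      rw [if_pos (by omega)]
      omega
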